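-- pv_equiv track=rewrite | github.com/steven-solar/acrocentric_analyses | synteny_plots/filter_bed.py | filter_bed_entries
-- ===== SOURCE A (Python) =====
-- def filter_bed_entries(entries):
-- 	"""Filter entries based on size and proximity conditions."""
-- 	large_entries = [
-- 		(chrom, start, end)
-- 		for chrom, start, end, name, score, strand, thick_start, thick_end, rgb in entries
-- 		if end - start >= 10000
-- 	]
-- 	filtered = []
--
-- 	for entry in entries:
-- 		chrom, start, end, name, score, strand, thick_start, thick_end, rgb = entry
-- 		size = end - start
--
-- 		# If the entry is at least 50kb, always keep it
-- 		if size >= 50000: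
-- 			filtered.append(entry)
-- 			continue
--
-- 		# Otherwise, check proximity to neighbors
-- 		has_large_neighbor = any(
-- 			large_chrom == chrom and (abs(start - large_end) <= 10000 or abs(large_start - end) <= 10000)
-- 			for large_chrom, large_start, large_end in large_entries
-- 		)
--
-- 		if has_large_neighbor:
-- 			filtered.append(entry)
--
-- 		# If no neighboring entry is within 10kb, discard this entry
-- 	return filtered
-- ===== SOURCE B (Python) =====
-- def _bisect_left(a, x):
-- 	"""Standard bisect_left: first index i with a[i] >= x in sorted list a."""
-- 	lo, hi = 0, len(a)
-- 	while lo < hi: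
-- 		mid = (lo + hi) // 2
-- 		if a[mid] < x:
-- 			lo = mid + 1
-- 		else:
-- 			hi = mid
-- 	return lo
--
--
-- def _near(sorted_vals, pos):
-- 	"""True iff some value of the sorted list lies within 10kb of pos."""
-- 	i = _bisect_left(sorted_vals, pos - 10000)
-- 	return i < len(sorted_vals) and sorted_vals[i] <= pos + 10000
--
--
-- def filter_bed_entries(entries):
-- 	"""Filter entries based on size and proximity conditions."""
-- 	larges = [
-- 		(chrom, start, end)
-- 		for chrom, start, end, name, score, strand, thick_start, thick_end, rgb in entries
-- 		if end - start >= 10000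
-- 	]
-- 	# Bucket the large entries per chromosome; iterating in sorted order makes
-- 	# every bucket an already-sorted array, ready for binary search.
-- 	ends = {}
-- 	for chrom, end in sorted(((c, e) for c, s, e in larges), key=lambda p: p[1]):
-- 		ends.setdefault(chrom, []).append(end)
-- 	starts = {}
-- 	for chrom, start in sorted(((c, s) for c, s, e in larges), key=lambda p: p[1]):
-- 		starts.setdefault(chrom, []).append(start)
--
-- 	filtered = []
-- 	for entry in entries:
-- 		chrom, start, end = entry[0], entry[1], entry[2]
-- 		if end - start >= 50000:
-- 			filtered.append(entry)
-- 		elif _near(ends.get(chrom, []), start) or _near(starts.get(chrom, []), end):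
-- 			filtered.append(entry)
-- 	return filtered
-- ===== Notes on version B (the rewrite author's own statement) =====
-- stated objective: faster
-- what changed: B replaces A's linear scan of every large entry per query by per-chromosome arrays of large starts/ends built in globally sorted order and probed with a hand-written binary search (bisect_left).
import Mathlib
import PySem

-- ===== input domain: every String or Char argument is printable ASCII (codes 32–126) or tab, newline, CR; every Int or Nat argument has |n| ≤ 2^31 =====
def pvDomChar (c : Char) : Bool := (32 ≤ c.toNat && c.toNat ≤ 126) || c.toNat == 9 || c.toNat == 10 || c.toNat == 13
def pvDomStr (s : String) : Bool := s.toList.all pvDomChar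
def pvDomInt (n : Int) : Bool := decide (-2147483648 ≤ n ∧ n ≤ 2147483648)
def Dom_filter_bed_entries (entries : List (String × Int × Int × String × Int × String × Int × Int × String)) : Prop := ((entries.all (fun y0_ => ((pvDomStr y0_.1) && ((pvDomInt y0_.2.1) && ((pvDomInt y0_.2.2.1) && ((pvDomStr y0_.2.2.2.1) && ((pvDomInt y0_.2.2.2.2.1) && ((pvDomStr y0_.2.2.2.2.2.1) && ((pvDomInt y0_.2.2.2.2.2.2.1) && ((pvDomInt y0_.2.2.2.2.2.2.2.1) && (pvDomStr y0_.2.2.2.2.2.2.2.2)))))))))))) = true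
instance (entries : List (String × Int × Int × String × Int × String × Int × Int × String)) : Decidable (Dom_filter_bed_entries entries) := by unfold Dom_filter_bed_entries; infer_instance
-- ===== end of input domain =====

-- B replaces A's linear scan of all large entries per query by per-chromosome arrays of large
-- starts/ends built in sorted order and probed by binary search (objective: faster).

-- ===== PORT A =====
def filter_bed_entries (entries : List (String × Int × Int × String × Int × String × Int × Int × String)) : List (String × Int × Int × String × Int × String × Int × Int × String) :=
  let large_entries : List (String × Int × Int) :=
    (entries.filter (fun e => 10000 ≤ e.2.2.1 - e.2.1)).map (fun e => (e.1, e.2.1, e.2.2.1))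
  entries.foldl (fun filtered e =>
    if 50000 ≤ e.2.2.1 - e.2.1 then filtered ++ [e]
    else if large_entries.any (fun l =>
        (l.1 == e.1) && (decide (|e.2.1 - l.2.2| ≤ 10000) || decide (|l.2.1 - e.2.2.1| ≤ 10000))) then
      filtered ++ [e]
    else filtered) []

-- ===== PORT B =====
-- _bisect_left in Source B is exactly the standard bisect_left loop, which PySem.List.bisectLeft implements.
def pvNear (sorted_vals : List Int) (pos : Int) : Bool :=
  let i := PySem.List.bisectLeft sorted_vals (pos - 10000)
  decide (i < sorted_vals.length) && decide (sorted_vals.getD i 0 ≤ pos + 10000)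

def filter_bed_entries_alt (entries : List (String × Int × Int × String × Int × String × Int × Int × String)) : List (String × Int × Int × String × Int × String × Int × Int × String) :=
  let larges : List (String × Int × Int) :=
    (entries.filter (fun e => 10000 ≤ e.2.2.1 - e.2.1)).map (fun e => (e.1, e.2.1, e.2.2.1))
  -- setdefault(chrom, []).append(v)  ==  d[chrom] = d.get(chrom, []) + [v]
  let ends : PySem.Dict String (List Int) :=
    (PySem.List.sorted (larges.map (fun t => (t.1, t.2.2))) (fun p => p.2) false).foldl
      (fun d p => d.modify p.1 [] (· ++ [p.2])) PySem.Dict.empty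
  let starts : PySem.Dict String (List Int) :=
    (PySem.List.sorted (larges.map (fun t => (t.1, t.2.1))) (fun p => p.2) false).foldl
      (fun d p => d.modify p.1 [] (· ++ [p.2])) PySem.Dict.empty
  entries.foldl (fun filtered e =>
    if 50000 ≤ e.2.2.1 - e.2.1 then filtered ++ [e]
    else if pvNear (ends.getD e.1 []) e.2.1 || pvNear (starts.getD e.1 []) e.2.2.1 then
      filtered ++ [e]
    else filtered) []

-- ===== PRECONDITION & SPEC =====
-- Instance search hits its size limit on the 9-tuple, so a DecidableEq term is built stepwise.
def pvDecEq6 : DecidableEq (String × Int × Int × String) := inferInstance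
def pvDecEq5 : DecidableEq (Int × String × Int × Int × String) := fun a b => @instDecidableEqProd _ _ _ pvDecEq6 a b
def pvDecEq4 : DecidableEq (String × Int × String × Int × Int × String) := fun a b => @instDecidableEqProd _ _ _ pvDecEq5 a b
def pvDecEq3 : DecidableEq (Int × String × Int × String × Int × Int × String) := fun a b => @instDecidableEqProd _ _ _ pvDecEq4 a b
def pvDecEq2 : DecidableEq (Int × Int × String × Int × String × Int × Int × String) := fun a b => @instDecidableEqProd _ _ _ pvDecEq3 a b
def pvDecEqEntry : DecidableEq (String × Int × Int × String × Int × String × Int × Int × String) := fun a b => @instDecidableEqProd _ _ _ pvDecEq2 a b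

def Spec_filter_bed_entries (entries : List (String × Int × Int × String × Int × String × Int × Int × String)) (out : List (String × Int × Int × String × Int × String × Int × Int × String)) : Prop := out = filter_bed_entries_alt entries
instance (entries : List (String × Int × Int × String × Int × String × Int × Int × String)) (out : List (String × Int × Int × String × Int × String × Int × Int × String)) : Decidable (Spec_filter_bed_entries entries out) := by unfold Spec_filter_bed_entries; exact @List.hasDecEq _ pvDecEqEntry out (filter_bed_entries_alt entries)

-- ===== CLAIM (what is proved, stated in full; the proofs are below) =====
def Claim_equal_filter_bed_entries : Prop := ∀ (entries : List (String × Int × Int × String × Int × String × Int × Int × String)), Dom_filter_bed_entries entries → Spec_filter_bed_entries entries (filter_bed_entries entries)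

-- ===== LEMMAS AND PROOFS =====

-- Binary-search probe on a sorted list answers the interval-membership query.
lemma pvNear_eq_any (a : List Int) (p : Int) (hs : a.Pairwise (· ≤ ·)) :
    pvNear a p = a.any (fun y => decide (p - 10000 ≤ y) && decide (y ≤ p + 10000)) := by
  obtain ⟨hle, hlt, hge⟩ := PySem.List.bisectLeft_spec a (p - 10000) hs
  have hmono : ∀ (i j : ℕ) (hi : i < a.length) (hj : j < a.length), i ≤ j → a[i] ≤ a[j] := by
    intro i j hi hj hij
    rcases lt_or_eq_of_le hij with h | h
    · exact List.pairwise_iff_getElem.mp hs i j hi hj h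
    · subst h; exact le_rfl
  unfold pvNear
  rw [Bool.eq_iff_iff]
  simp only [Bool.and_eq_true, decide_eq_true_eq, List.any_eq_true]
  constructor
  · rintro ⟨hi, hub⟩
    rw [List.getD_eq_getElem _ _ hi] at hub
    exact ⟨_, List.getElem_mem hi, hge _ hi le_rfl, hub⟩
  · rintro ⟨y, hy, hlo, hhi⟩
    obtain ⟨j, hj, rfl⟩ := List.getElem_of_mem hy
    have hji : PySem.List.bisectLeft a (p - 10000) ≤ j := by
      by_contra h
      have := hlt j hj (by omega)
      omega
    have hi : PySem.List.bisectLeft a (p - 10000) < a.length := lt_of_le_of_lt hji hj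
    refine ⟨hi, ?_⟩
    rw [List.getD_eq_getElem _ _ hi]
    exact le_trans (hmono _ _ hi hj hji) hhi

-- The bucket stored for chromosome c: values of the sorted pair list whose key is c, in order.
lemma bucket_getD (pairs : List (String × Int)) (c : String) :
    ((PySem.List.sorted pairs (fun p => p.2) false).foldl
        (fun (d : PySem.Dict String (List Int)) p => d.modify p.1 [] (· ++ [p.2])) PySem.Dict.empty).getD c []
      = (((PySem.List.sorted pairs (fun p => p.2) false).filter (fun p => p.1 == c)).map (·.2)) := by
  rw [PySem.Dict.getD_foldl_modify_append]
  simp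

-- Each bucket is sorted (it was filled in globally sorted order).
lemma bucket_sorted (pairs : List (String × Int)) (c : String) :
    ((((PySem.List.sorted pairs (fun p => p.2) false).filter (fun p => p.1 == c)).map (·.2)).Pairwise (· ≤ ·)) := by
  have h := PySem.List.sorted_pairwise pairs (fun p => p.2) (κ := Int)
  exact List.Pairwise.map _ (fun _ _ h => h) (h.filter _)

-- For every entry, A's scan over all large entries equals B's two binary-search probes.
lemma cond_eq (larges : List (String × Int × Int)) (e : String × Int × Int × String × Int × String × Int × Int × String) :
    (larges.any (fun l =>
        (l.1 == e.1) && (decide (|e.2.1 - l.2.2| ≤ 10000) || decide (|l.2.1 - e.2.2.1| ≤ 10000))))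
      = (pvNear (((PySem.List.sorted (larges.map (fun t => (t.1, t.2.2))) (fun p => p.2) false).foldl
            (fun (d : PySem.Dict String (List Int)) p => d.modify p.1 [] (· ++ [p.2])) PySem.Dict.empty).getD e.1 []) e.2.1
        || pvNear (((PySem.List.sorted (larges.map (fun t => (t.1, t.2.1))) (fun p => p.2) false).foldl
            (fun (d : PySem.Dict String (List Int)) p => d.modify p.1 [] (· ++ [p.2])) PySem.Dict.empty).getD e.1 []) e.2.2.1) := by
  rw [bucket_getD, bucket_getD, pvNear_eq_any _ _ (bucket_sorted _ _), pvNear_eq_any _ _ (bucket_sorted _ _)]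
  rw [Bool.eq_iff_iff]
  simp only [Bool.or_eq_true, List.any_eq_true, Bool.and_eq_true, decide_eq_true_eq, beq_iff_eq,
    List.mem_filter, PySem.List.mem_sorted, List.mem_map, abs_le]
  constructor
  · rintro ⟨l, hl, hc, hprox | hprox⟩
    · exact Or.inl ⟨l.2.2, ⟨(l.1, l.2.2), ⟨⟨l, hl, rfl⟩, hc⟩, rfl⟩, by omega⟩
    · exact Or.inr ⟨l.2.1, ⟨(l.1, l.2.1), ⟨⟨l, hl, rfl⟩, hc⟩, rfl⟩, by omega⟩
  · rintro (⟨x, ⟨a, ⟨⟨l, hl, rfl⟩, hc⟩, rfl⟩, h1, h2⟩ | ⟨x, ⟨a, ⟨⟨l, hl, rfl⟩, hc⟩, rfl⟩, h1, h2⟩)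
    · exact ⟨l, hl, hc, Or.inl (by omega)⟩
    · exact ⟨l, hl, hc, Or.inr (by omega)⟩

-- ===== VERDICT (by name: the statement is the Claim_ definition above) =====
theorem filter_bed_entries_spec : Claim_equal_filter_bed_entries := by
  intro entries _
  unfold Spec_filter_bed_entries filter_bed_entries filter_bed_entries_alt
  simp only [cond_eq]
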